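-- pv_equiv track=rewrite | github.com/thegeneralgeneral/advent-of-code | day13/__init__.py | is_order_equivalent
-- ===== SOURCE A (Python) =====
-- def is_order_equivalent(order1, order2):
--     for i in range(0, len(order1)):
--         # check if each offset list is the same as order2.
--         offset_list = order1[i:len(order1)] + order1[:i]
--         if offset_list == order2:
--             return True
--         if offset_list == list(reversed(order2)):
--             return True
--     return False
-- ===== SOURCE B (Python) =====
-- def _canonical(xs):
--     # lexicographically least rotation of xs (naive canonicalization)
--     best = xs
--     cur = xs
--     for _ in range(len(xs) - 1):
--         cur = cur[1:] + cur[:1]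
--         if cur < best:
--             best = cur
--     return best
--
--
-- def is_order_equivalent(order1, order2):
--     if len(order1) != len(order2):
--         return False
--     c1 = _canonical(order1)
--     return c1 == _canonical(order2) or c1 == _canonical(list(reversed(order2)))
-- ===== Notes on version B (the rewrite author's own statement) =====
-- stated objective: alternative
-- what changed: B canonicalizes each sequence to its lexicographically least rotation and compares canonical forms (of order1, order2, and reversed order2), instead of A's search that generates each rotation of order1 and tests it against order2 and its reverse.
-- intended difference: On the single input ([], []) A returns False because its loop over range(len(order1)) never runs, while B returns True; the empty sequence is trivially a rotation of itself, so B's value is the intended one. — e.g. on is_order_equivalent([], []): A returns false, B returns true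
import Mathlib
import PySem

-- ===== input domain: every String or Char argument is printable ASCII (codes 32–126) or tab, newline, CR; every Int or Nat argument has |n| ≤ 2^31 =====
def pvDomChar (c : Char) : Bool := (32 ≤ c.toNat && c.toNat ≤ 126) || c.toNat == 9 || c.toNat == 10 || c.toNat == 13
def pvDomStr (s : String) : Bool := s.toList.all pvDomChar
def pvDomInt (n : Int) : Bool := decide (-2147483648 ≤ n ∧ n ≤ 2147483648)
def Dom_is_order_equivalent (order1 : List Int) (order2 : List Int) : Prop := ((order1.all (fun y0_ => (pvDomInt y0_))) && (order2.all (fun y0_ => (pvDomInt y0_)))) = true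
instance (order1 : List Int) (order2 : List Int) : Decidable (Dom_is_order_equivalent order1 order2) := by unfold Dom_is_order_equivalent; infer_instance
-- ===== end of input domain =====

-- B canonicalizes each list to its lexicographically least rotation and compares canonical
-- forms, instead of A's search over all rotations of order1 (objective: alternative).

-- ===== PORT A =====
-- the for-loop with its two early returns, one index at a time
def is_order_equivalent_loop (order1 : List Int) (order2 : List Int) : List Int → Bool
  | [] => false
  | i :: rest =>
    let offset_list := PySem.List.slice order1 (some i) (some (order1.length : Int)) ++
                       PySem.List.slice order1 (some 0) (some i)
    if offset_list = order2 then true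
    else if offset_list = order2.reverse then true  -- list(reversed(order2))
    else is_order_equivalent_loop order1 order2 rest

def is_order_equivalent (order1 : List Int) (order2 : List Int) : Bool :=
  is_order_equivalent_loop order1 order2 (PySem.List.pyRange 0 order1.length 1)

-- ===== PORT B =====
-- _canonical: the lexicographically least rotation of xs, by the loop in Source B
-- (state is the pair (best, cur); Python's list `<` is the lexicographic order on List Int)
def pvCanonical (xs : List Int) : List Int :=
  ((PySem.List.pyRange 0 ((xs.length : Int) - 1) 1).foldl
    (fun (st : List Int × List Int) _ =>
      let cur := PySem.List.slice st.2 (some 1) none ++ PySem.List.slice st.2 none (some 1)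
      (if cur < st.1 then cur else st.1, cur))
    (xs, xs)).1

def is_order_equivalent_alt (order1 : List Int) (order2 : List Int) : Bool :=
  if (order1.length : Int) ≠ (order2.length : Int) then false
  else
    let c1 := pvCanonical order1
    decide (c1 = pvCanonical order2) || decide (c1 = pvCanonical order2.reverse)

-- ===== PRECONDITION & SPEC =====
-- On the single input ([], []) A returns False because its loop over range(len(order1)) never
-- runs, while B returns True; the empty sequence is trivially a rotation of itself, so B's
-- value is the intended one.
def D_is_order_equivalent (order1 : List Int) (order2 : List Int) : Prop :=
  order1 = [] ∧ order2 = []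
instance (order1 : List Int) (order2 : List Int) : Decidable (D_is_order_equivalent order1 order2) := by unfold D_is_order_equivalent; infer_instance

def Spec_is_order_equivalent (order1 : List Int) (order2 : List Int) (out : Bool) : Prop := ¬ D_is_order_equivalent order1 order2 → out = is_order_equivalent_alt order1 order2
instance (order1 : List Int) (order2 : List Int) (out : Bool) : Decidable (Spec_is_order_equivalent order1 order2 out) := by unfold Spec_is_order_equivalent; infer_instance

def pvDiffWitness_is_order_equivalent : List Int × List Int := ([], [])
def pvDiffWitnessOut_is_order_equivalent : Bool × Bool := (false, true)

-- ===== CLAIM (what is proved, stated in full; the proofs are below) =====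
def Claim_unchanged_is_order_equivalent : Prop := ∀ (order1 : List Int) (order2 : List Int), Dom_is_order_equivalent order1 order2 → Spec_is_order_equivalent order1 order2 (is_order_equivalent order1 order2)
def Claim_changed_is_order_equivalent : Prop := Dom_is_order_equivalent (pvDiffWitness_is_order_equivalent.1) (pvDiffWitness_is_order_equivalent.2) ∧ D_is_order_equivalent (pvDiffWitness_is_order_equivalent.1) (pvDiffWitness_is_order_equivalent.2) ∧ is_order_equivalent (pvDiffWitness_is_order_equivalent.1) (pvDiffWitness_is_order_equivalent.2) = pvDiffWitnessOut_is_order_equivalent.1 ∧ is_order_equivalent_alt (pvDiffWitness_is_order_equivalent.1) (pvDiffWitness_is_order_equivalent.2) = pvDiffWitnessOut_is_order_equivalent.2 ∧ pvDiffWitnessOut_is_order_equivalent.1 ≠ pvDiffWitnessOut_is_order_equivalent.2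
def Claim_exact_is_order_equivalent : Prop := ∀ (order1 : List Int) (order2 : List Int), Dom_is_order_equivalent order1 order2 → D_is_order_equivalent order1 order2 → is_order_equivalent order1 order2 ≠ is_order_equivalent_alt order1 order2

-- ===== LEMMAS AND PROOFS =====

-- A's rotation at index i, as drop/take
theorem offset_eq_drop_take (o1 : List Int) (i : Int) (h0 : 0 ≤ i) (_h1 : i ≤ (o1.length : Int)) :
    PySem.List.slice o1 (some i) (some (o1.length : Int)) ++ PySem.List.slice o1 (some 0) (some i)
      = o1.drop i.toNat ++ o1.take i.toNat := by
  rw [PySem.List.slice_toNat o1 h0 (by positivity), PySem.List.slice_zero_start,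
      PySem.List.slice_to o1 h0]
  congr 1
  exact List.take_of_length_le (by simp only [List.length_drop, Int.toNat_natCast]; omega)

-- A's loop over an index list is an `any` over the per-rotation test
theorem loop_eq_any (o1 o2 : List Int) (l : List Int) :
    is_order_equivalent_loop o1 o2 l
      = l.any (fun i =>
          decide (PySem.List.slice o1 (some i) (some (o1.length : Int)) ++
                  PySem.List.slice o1 (some 0) (some i) = o2) ||
          decide (PySem.List.slice o1 (some i) (some (o1.length : Int)) ++
                  PySem.List.slice o1 (some 0) (some i) = o2.reverse)) := by
  induction l with
  | nil => rfl
  | cons i rest ih =>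
    simp only [is_order_equivalent_loop]
    split_ifs with h1 h2
    · simp only [List.any_cons, h1, decide_true, Bool.true_or]
    · simp only [List.any_cons, h2, decide_true, Bool.true_or, Bool.or_true]
    · simp only [List.any_cons, h1, h2, decide_false, Bool.false_or, ih]

-- one pass of Source B's loop body
def pvStep (st : List Int × List Int) : List Int × List Int :=
  let cur := PySem.List.slice st.2 (some 1) none ++ PySem.List.slice st.2 none (some 1)
  (if cur < st.1 then cur else st.1, cur)

-- a foldl that ignores the list's elements is an iterate
theorem foldl_ignore {α β : Type} (g : α → α) (l : List β) (init : α) :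
    l.foldl (fun st _ => g st) init = g^[l.length] init := by
  induction l generalizing init with
  | nil => rfl
  | cons x xs ih => simp [List.foldl_cons, ih, Function.iterate_succ_apply]

theorem canonical_eq_iterate (xs : List Int) :
    pvCanonical xs = (pvStep^[xs.length - 1] (xs, xs)).1 := by
  unfold pvCanonical
  rw [show (fun (st : List Int × List Int) _ =>
      (if (PySem.List.slice st.2 (some 1) none ++ PySem.List.slice st.2 none (some 1)) < st.1
       then PySem.List.slice st.2 (some 1) none ++ PySem.List.slice st.2 none (some 1)
       else st.1,
       PySem.List.slice st.2 (some 1) none ++ PySem.List.slice st.2 none (some 1)))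
      = (fun (st : List Int × List Int) (_ : Int) => pvStep st) from rfl,
    foldl_ignore, PySem.List.length_pyRange_one]
  have h : (((xs.length : Int) - 1) - 0).toNat = xs.length - 1 := by omega
  rw [h]

-- one step rotates `cur` by one
theorem step_snd_rotate (l : List Int) (hl : l ≠ []) (b : List Int) :
    (pvStep (b, l)).2 = l.rotate 1 := by
  simp only [pvStep, PySem.List.slice_from_one, PySem.List.slice_to l (by norm_num : (0:Int) ≤ 1)]
  rw [List.rotate_eq_drop_append_take (by cases l with | nil => exact absurd rfl hl | cons a t => simp)]
  simp [List.drop_one]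

-- loop invariant: after k steps, cur = rotate k and best is the least of rotations 0..k
theorem iterate_invariant (xs : List Int) (hxs : xs ≠ []) (k : Nat) :
    (pvStep^[k] (xs, xs)).2 = xs.rotate k ∧
    (pvStep^[k] (xs, xs)).1 ∈ (List.range (k + 1)).map (xs.rotate ·) ∧
    (∀ j ≤ k, (pvStep^[k] (xs, xs)).1 ≤ xs.rotate j) := by
  induction k with
  | zero =>
    refine ⟨by simp, by simp, ?_⟩
    intro j hj
    simp only [Nat.le_zero] at hj
    simp [hj]
  | succ k ih =>
    obtain ⟨hcur, hmem, hle⟩ := ih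
    have hrotne : xs.rotate k ≠ [] := by simp [hxs]
    have hiter : pvStep^[k+1] (xs, xs) = pvStep (pvStep^[k] (xs, xs)) :=
      Function.iterate_succ_apply' pvStep k (xs, xs)
    have hnext2 : (pvStep^[k+1] (xs, xs)).2 = xs.rotate (k + 1) := by
      rw [hiter, show pvStep^[k] (xs, xs) = ((pvStep^[k] (xs, xs)).1, (pvStep^[k] (xs, xs)).2) from rfl, hcur,
          step_snd_rotate _ hrotne, List.rotate_rotate]
    have hcur' : (pvStep (pvStep^[k] (xs, xs))).2 = xs.rotate (k + 1) := by
      rw [← hiter]; exact hnext2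
    -- the new best is either the new rotation or the old best
    have hfst : (pvStep^[k+1] (xs, xs)).1
        = (if (pvStep (pvStep^[k] (xs, xs))).2 < (pvStep^[k] (xs, xs)).1
           then (pvStep (pvStep^[k] (xs, xs))).2 else (pvStep^[k] (xs, xs)).1) := by
      rw [hiter]
      rfl
    refine ⟨hnext2, ?_, ?_⟩
    · rw [hfst, hcur']
      split_ifs with h
      · exact List.mem_map.mpr ⟨k + 1, by simp⟩
      · rcases List.mem_map.mp hmem with ⟨j, hj, hrw⟩
        exact List.mem_map.mpr ⟨j, List.mem_range.mpr (Nat.lt_succ_of_lt (List.mem_range.mp hj)), hrw⟩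
    · intro j hj
      rw [hfst, hcur']
      split_ifs with h
      · rcases Nat.lt_succ_iff_lt_or_eq.mp (Nat.lt_succ_of_le hj) with hj' | hj'
        · exact le_of_lt (lt_of_lt_of_le (hcur' ▸ h) (hle j (Nat.lt_succ_iff.mp hj')))
        · rw [hj']
      · rcases Nat.lt_succ_iff_lt_or_eq.mp (Nat.lt_succ_of_le hj) with hj' | hj'
        · exact hle j (Nat.lt_succ_iff.mp hj')
        · rw [hj']
          exact le_of_not_gt h

-- pvCanonical is a rotation of xs and is ≤ every rotation of xs
theorem canonical_mem (xs : List Int) (hxs : xs ≠ []) :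
    ∃ j < xs.length, pvCanonical xs = xs.rotate j := by
  obtain ⟨_, hmem, _⟩ := iterate_invariant xs hxs (xs.length - 1)
  rcases List.mem_map.mp hmem with ⟨j, hj, hrw⟩
  refine ⟨j, ?_, (canonical_eq_iterate xs).trans hrw.symm⟩
  have := List.mem_range.mp hj
  have : 0 < xs.length := List.length_pos_of_ne_nil hxs
  omega

theorem canonical_le (xs : List Int) (hxs : xs ≠ []) (j : Nat) :
    pvCanonical xs ≤ xs.rotate j := by
  obtain ⟨_, _, hle⟩ := iterate_invariant xs hxs (xs.length - 1)
  have hn : 0 < xs.length := List.length_pos_of_ne_nil hxs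
  rw [canonical_eq_iterate]
  calc (pvStep^[xs.length - 1] (xs, xs)).1 ≤ xs.rotate (j % xs.length) :=
        hle _ (by have := Nat.mod_lt j hn; omega)
    _ = xs.rotate j := List.rotate_mod xs j

theorem canonical_isRotated (xs : List Int) (hxs : xs ≠ []) : xs ~r pvCanonical xs := by
  obtain ⟨j, _, hrw⟩ := canonical_mem xs hxs
  exact ⟨j, hrw.symm⟩

theorem canonical_le_of_rotated (xs z : List Int) (hxs : xs ≠ []) (h : xs ~r z) :
    pvCanonical xs ≤ z := by
  obtain ⟨j, hj⟩ := h
  exact hj ▸ canonical_le xs hxs j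

theorem canonical_eq_of_rotated (xs ys : List Int) (hxs : xs ≠ []) (h : xs ~r ys) :
    pvCanonical xs = pvCanonical ys := by
  have hys : ys ≠ [] := by
    intro hnil
    rw [hnil] at h
    exact hxs (List.isRotated_nil_iff.mp h)
  exact le_antisymm
    (canonical_le_of_rotated xs _ hxs (h.trans (canonical_isRotated ys hys)))
    (canonical_le_of_rotated ys _ hys (h.symm.trans (canonical_isRotated xs hxs)))

theorem canonical_eq_iff (xs ys : List Int) (hxs : xs ≠ []) (hys : ys ≠ []) :
    xs ~r ys ↔ pvCanonical xs = pvCanonical ys := by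
  constructor
  · exact canonical_eq_of_rotated xs ys hxs
  · intro h
    exact ((canonical_isRotated xs hxs).trans (h ▸ (canonical_isRotated ys hys).symm))

-- A's existential over integer indices, as IsRotated
theorem exists_pyIdx_rotate (o1 t : List Int) (ho1 : o1 ≠ []) :
    (∃ i, (0 ≤ i ∧ i < (o1.length : Int)) ∧ o1.drop i.toNat ++ o1.take i.toNat = t) ↔ o1 ~r t := by
  have hn : 0 < o1.length := List.length_pos_of_ne_nil ho1
  constructor
  · rintro ⟨i, ⟨h0, h1⟩, hrw⟩
    refine ⟨i.toNat, ?_⟩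
    rw [List.rotate_eq_drop_append_take (by omega)]
    exact hrw
  · rintro ⟨j, hj⟩
    refine ⟨((j % o1.length : Nat) : Int), ⟨by positivity, by exact_mod_cast Nat.mod_lt j hn⟩, ?_⟩
    rw [Int.toNat_natCast, ← List.rotate_eq_drop_append_take (le_of_lt (Nat.mod_lt j hn)),
        List.rotate_mod]
    exact hj

theorem is_order_equivalent_eq_alt (order1 order2 : List Int)
    (hD : ¬ (order1 = [] ∧ order2 = [])) :
    is_order_equivalent order1 order2 = is_order_equivalent_alt order1 order2 := by
  unfold is_order_equivalent is_order_equivalent_alt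
  rw [loop_eq_any]
  by_cases h1 : order1 = []
  · -- order2 ≠ [], so the length test fails and both sides are false
    have h2 : order2 ≠ [] := fun h2 => hD ⟨h1, h2⟩
    subst h1
    have hpos := List.length_pos_of_ne_nil h2
    rw [if_pos (by simp only [List.length_nil, Nat.cast_zero]; intro hc; omega)]
    simp
  · by_cases hlen : (order1.length : Int) = (order2.length : Int)
    · -- equal (positive) lengths: both sides decide rotation-equivalence
      have h2 : order2 ≠ [] := by
        intro h
        apply h1
        rw [h] at hlen
        simpa using List.length_eq_zero_iff.mp (by exact_mod_cast hlen)
      have h2r : order2.reverse ≠ [] := by simpa using h2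
      rw [if_neg (not_not_intro hlen)]
      rw [Bool.eq_iff_iff]
      simp only [List.any_eq_true, PySem.List.mem_pyRange_one, Bool.or_eq_true,
        decide_eq_true_eq]
      constructor
      · rintro ⟨i, ⟨hi0, hi1⟩, hcase⟩
        have hrw := offset_eq_drop_take order1 i hi0 (le_of_lt hi1)
        rcases hcase with hc | hc
        · left
          rw [← canonical_eq_iff order1 order2 h1 h2]
          exact (exists_pyIdx_rotate order1 order2 h1).mp ⟨i, ⟨hi0, hi1⟩, by rw [← hrw]; exact hc⟩
        · right
          rw [← canonical_eq_iff order1 order2.reverse h1 h2r]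
          exact (exists_pyIdx_rotate order1 order2.reverse h1).mp
            ⟨i, ⟨hi0, hi1⟩, by rw [← hrw]; exact hc⟩
      · intro hcase
        rcases hcase with hc | hc
        · rw [← canonical_eq_iff order1 order2 h1 h2] at hc
          obtain ⟨i, hi, hrw⟩ := (exists_pyIdx_rotate order1 order2 h1).mpr hc
          exact ⟨i, hi, Or.inl (by rw [offset_eq_drop_take order1 i hi.1 (le_of_lt hi.2)]; exact hrw)⟩
        · rw [← canonical_eq_iff order1 order2.reverse h1 h2r] at hc
          obtain ⟨i, hi, hrw⟩ := (exists_pyIdx_rotate order1 order2.reverse h1).mpr hc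
          exact ⟨i, hi, Or.inr (by rw [offset_eq_drop_take order1 i hi.1 (le_of_lt hi.2)]; exact hrw)⟩
    · -- unequal lengths: B is false; each rotation keeps order1's length, so A's tests all fail
      rw [if_pos hlen]
      rw [List.any_eq_false]
      intro i hi
      rw [PySem.List.mem_pyRange_one] at hi
      rw [offset_eq_drop_take order1 i hi.1 (le_of_lt hi.2)]
      have hl : (order1.drop i.toNat ++ order1.take i.toNat).length = order1.length := by
        simp; omega
      simp only [Bool.or_eq_true, decide_eq_true_eq, not_or]
      constructor <;> intro h <;> apply hlen
      · rw [← h, hl]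
      · have := congrArg List.length h
        rw [hl, List.length_reverse] at this
        exact_mod_cast this

-- ===== VERDICT (by name: the statements are the Claim_ definitions above) =====
theorem is_order_equivalent_spec : Claim_unchanged_is_order_equivalent := by
  intro order1 order2 _ hD
  exact is_order_equivalent_eq_alt order1 order2 hD

theorem is_order_equivalent_changed : Claim_changed_is_order_equivalent := by
  unfold Claim_changed_is_order_equivalent; decide

theorem is_order_equivalent_tight : Claim_exact_is_order_equivalent := by
  intro order1 order2 _ hD
  obtain ⟨h1, h2⟩ := hD
  subst h1; subst h2
  decide
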